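-- pv_equiv track=rewrite | github.com/Roc25/Kursach_graph | parasoch.py | delet
-- ===== SOURCE A (Python) =====
-- def delet(v, mas, g):
--     nmas = []
--     for i in range(len(mas)):
--         if not ((v[0] in mas[i]) or (v[1] in mas[i])):
--             nmas.append(mas[i].copy())
--     g.append(v.copy())
--     if nmas == []:
--         return g
--     for i in nmas:
--         return delet(i.copy(), nmas.copy(), g)
-- ===== SOURCE B (Python) =====
-- def delet(v, mas, g):
--     # Single left-to-right greedy scan with an accumulated list of blocked
--     # endpoints, instead of A's repeated filter-and-recurse on shrinking lists.
--     # Like A, mutates g in place by appending copies.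
--     g.append(v.copy())
--     if not mas:
--         return g
--     blocked = [v[0], v[1]]
--     for m in mas:
--         if not any(x in m for x in blocked):
--             g.append(m.copy())
--             blocked += [m[0], m[1]]
--     return g
-- ===== Notes on version B (the rewrite author's own statement) =====
-- stated objective: alternative
-- what changed: Replaced A's recursion (re-filter the whole candidate list after each chosen edge and recurse on the first survivor) by one left-to-right scan of mas that keeps a growing list of blocked endpoints and appends each edge disjoint from it.
-- outside the precondition, e.g. on delet([3], [[3, 4], [3, 5]], []): A returns [[3]], B raises IndexError; on delet([1, 2], [[1]], []): A returns [[1, 2]], B returns [[1, 2]]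
import Mathlib
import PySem

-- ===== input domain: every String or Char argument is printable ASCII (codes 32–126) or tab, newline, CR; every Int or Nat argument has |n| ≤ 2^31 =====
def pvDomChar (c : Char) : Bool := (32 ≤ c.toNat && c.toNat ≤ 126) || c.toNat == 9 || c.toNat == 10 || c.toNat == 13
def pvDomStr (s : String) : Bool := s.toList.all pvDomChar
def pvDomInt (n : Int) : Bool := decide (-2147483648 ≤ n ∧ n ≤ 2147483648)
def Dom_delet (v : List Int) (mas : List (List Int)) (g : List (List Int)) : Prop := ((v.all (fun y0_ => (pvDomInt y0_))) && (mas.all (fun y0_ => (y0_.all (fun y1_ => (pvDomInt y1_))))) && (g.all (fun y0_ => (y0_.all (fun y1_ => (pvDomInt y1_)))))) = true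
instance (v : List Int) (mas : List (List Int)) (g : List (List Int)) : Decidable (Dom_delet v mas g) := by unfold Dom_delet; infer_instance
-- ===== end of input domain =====

-- B replaces A's filter-and-recurse greedy by a single left-to-right scan of mas keeping a
-- growing list of blocked endpoints (same return value; both Pythons mutate the argument g in
-- place by appending copies; the equality proved here is about the return value).

-- ===== PORT A =====
-- Python 'not ((v[0] in mas[i]) or (v[1] in mas[i]))' is 'not conflictA'; pyGet? none = IndexError
-- (Python raises there; those inputs are outside Pre_delet, the port returns 'true' = edge dropped).
def conflictA (v m : List Int) : Bool :=
  match PySem.List.pyGet? v 0 with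
  | none => true
  | some a =>
    if m.contains a then true
    else
      match PySem.List.pyGet? v 1 with
      | none => true
      | some b => m.contains b

-- A's recursion ported with fuel mas.length + 2 (an upper bound on A's recursion depth inside
-- Pre_delet: after the first step the candidate list strictly shrinks each step); fuel 0 unreachable there.
def deletA : Nat → List Int → List (List Int) → List (List Int) → List (List Int)
  | 0, _, _, g => g
  | fuel+1, v, mas, g =>
    let nmas := (PySem.List.pyRange 0 (PySem.List.len mas) 1).foldl
      (fun acc i =>
        if !(conflictA v (PySem.List.pyGetD mas i [])) then acc ++ [PySem.List.pyGetD mas i []]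
        else acc) []
    let g1 := g ++ [v]
    if nmas = [] then g1
    else
      match nmas with
      | [] => g1                      -- unreachable ('for i in nmas' with nmas ≠ [])
      | i :: _ => deletA fuel i nmas g1

def delet (v : List Int) (mas : List (List Int)) (g : List (List Int)) : List (List Int) :=
  deletA (mas.length + 2) v mas g

-- ===== PORT B =====
-- Python 'any(x in m for x in blocked)'.
def hitB (blocked m : List Int) : Bool := blocked.any (fun x => m.contains x)

-- Source B's for-loop over mas: state = (blocked, g), one edge consumed per step.
def scanB : List (List Int)  → List Int → List (List Int) → List (List Int)
  | [], _, g => g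
  | m :: rest, blocked, g =>
    if hitB blocked m then scanB rest blocked g
    else scanB rest (blocked ++ [PySem.List.pyGetD m 0 0, PySem.List.pyGetD m 1 0]) (g ++ [m])

def delet_alt (v : List Int) (mas : List (List Int)) (g : List (List Int)) : List (List Int) :=
  let g1 := g ++ [v]
  if mas.isEmpty then g1
  else scanB mas [PySem.List.pyGetD v 0 0, PySem.List.pyGetD v 1 0] g1

-- ===== PRECONDITION & SPEC =====
-- Pre_ excludes inputs where the Python programs can hit an IndexError on v[0]/v[1] (or on a later
-- chosen edge's m[0]/m[1]): it requires 2 ≤ len of v (when mas ≠ []) and of every edge in mas.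
-- This is slightly narrower than A's true domain: a too-short edge whose first entry occurs in
-- every candidate is saved by 'or' short-circuiting in A while B indexes it (see cites); on
-- never-chosen short edges both programs return the same value.
def Pre_delet (v : List Int) (mas : List (List Int)) (g : List (List Int)) : Prop :=
  (mas = [] ∨ 2 ≤ v.length) ∧ ∀ m ∈ mas, 2 ≤ m.length
instance (v : List Int) (mas : List (List Int)) (g : List (List Int)) : Decidable (Pre_delet v mas g) := by unfold Pre_delet; infer_instance

def pvWitness_delet : List Int × List (List Int) × List (List Int) := ([1, 2], [[3, 4], [1, 5]], [])

def Spec_delet (v : List Int) (mas : List (List Int)) (g : List (List Int)) (out : List (List Int)) : Prop := out = delet_alt v mas g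
instance (v : List Int) (mas : List (List Int)) (g : List (List Int)) (out : List (List Int)) : Decidable (Spec_delet v mas g out) := by unfold Spec_delet; infer_instance

-- ===== CLAIM (what is proved, stated in full; the proofs are below) =====
def Claim_equal_delet : Prop := ∀ (v : List Int) (mas : List (List Int)) (g : List (List Int)), Dom_delet v mas g → Pre_delet v mas g → Spec_delet v mas g (delet v mas g)

-- ===== LEMMAS AND PROOFS =====

-- For an edge with at least two entries, A's conflict test is B's hit test against its two endpoints.
theorem conflict_eq_hit (v : List Int) (hv : 2 ≤ v.length) (m : List Int) :
    conflictA v m = hitB [PySem.List.pyGetD v 0 0, PySem.List.pyGetD v 1 0] m := by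
  match v, hv with
  | a :: b :: t, _ =>
    simp only [conflictA, hitB]
    simp [pysem]

-- An edge with at least two entries hits its own endpoint list.
theorem self_hit (v : List Int) (hv : 2 ≤ v.length) :
    hitB [PySem.List.pyGetD v 0 0, PySem.List.pyGetD v 1 0] v = true := by
  match v, hv with
  | a :: b :: t, _ => simp [hitB, pysem]

-- Edges hit by a prefix of the blocked list may be filtered out up front: scanB skips them anyway.
theorem scan_filter (B0 : List Int) :
    ∀ (lst : List (List Int)) (B1 : List Int) (g : List (List Int)),
      scanB lst (B0 ++ B1) g = scanB (lst.filter (fun m => !hitB B0 m)) (B0 ++ B1) g := by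
  intro lst
  induction lst with
  | nil => intro B1 g; rfl
  | cons m rest ih =>
    intro B1 g
    have hsplit : hitB (B0 ++ B1) m = (hitB B0 m || hitB B1 m) := by
      simp only [hitB, List.any_append]
    cases h0 : hitB B0 m with
    | true =>
      rw [List.filter_cons_of_neg (by simp [h0])]
      simp only [scanB, hsplit, h0, Bool.true_or, if_true]
      exact ih B1 g
    | false =>
      rw [List.filter_cons_of_pos (by simp [h0])]
      cases h1 : hitB B1 m with
      | true =>
        simp only [scanB, hsplit, h0, h1, Bool.false_or, if_true]
        exact ih B1 g
      | false =>
        simp only [scanB, hsplit, h0, h1, Bool.false_or, Bool.false_eq_true, if_false]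
        rw [List.append_assoc]
        exact ih (B1 ++ [PySem.List.pyGetD m 0 0, PySem.List.pyGetD m 1 0]) (g ++ [m])

-- A blocked-list prefix no surviving edge hits can be dropped from the state.
theorem scan_drop (B0 : List Int) :
    ∀ (lst : List (List Int)) (B1 : List Int) (g : List (List Int)),
      (∀ m ∈ lst, hitB B0 m = false) →
      scanB lst (B0 ++ B1) g = scanB lst B1 g := by
  intro lst
  induction lst with
  | nil => intro B1 g _; rfl
  | cons m rest ih =>
    intro B1 g hno
    have h0 : hitB B0 m = false := hno m (by simp)
    have hhit : hitB (B0 ++ B1) m = hitB B1 m := by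
      simp only [hitB] at h0
      simp only [hitB, List.any_append, h0, Bool.false_or]
    cases h1 : hitB B1 m with
    | false =>
      simp only [scanB, hhit, h1, if_false, Bool.false_eq_true, List.append_assoc]
      exact ih _ _ (fun m' hm' => hno m' (by simp [hm']))
    | true =>
      simp only [scanB, hhit, h1, if_true]
      exact ih _ _ (fun m' hm' => hno m' (by simp [hm']))

-- The core equivalence: A's fueled filter-and-recurse equals B's single scan.
theorem deletA_eq_scanB :
    ∀ (fuel : Nat) (v : List Int) (lst : List (List Int)) (g : List (List Int)),
      (∀ m ∈ lst, 2 ≤ m.length) → 2 ≤ v.length →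
      (lst.length + 2 ≤ fuel ∨ (v ∈ lst ∧ lst.length + 1 ≤ fuel)) →
      deletA fuel v lst g
        = scanB lst [PySem.List.pyGetD v 0 0, PySem.List.pyGetD v 1 0] (g ++ [v]) := by
  intro fuel
  induction fuel with
  | zero => intro v lst g _ _ hf; rcases hf with h | ⟨_, h⟩ <;> omega
  | succ f ih =>
    intro v lst g hlen hv hf
    have hfold :
        (PySem.List.pyRange 0 (PySem.List.len lst) 1).foldl
          (fun acc i =>
            if !(conflictA v (PySem.List.pyGetD lst i [])) then acc ++ [PySem.List.pyGetD lst i []]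
            else acc) []
        = lst.filter (fun m => !hitB [PySem.List.pyGetD v 0 0, PySem.List.pyGetD v 1 0] m) := by
      rw [PySem.List.foldl_pyRange_zero_pyGetD lst []
        (fun acc m => if !(conflictA v m) then acc ++ [m] else acc) []]
      rw [PySem.List.foldl_append_if_eq_filter]
      simp only [List.nil_append]
      exact List.filter_congr (fun m _ => by rw [conflict_eq_hit v hv m])
    have hrhs :
        scanB lst [PySem.List.pyGetD v 0 0, PySem.List.pyGetD v 1 0] (g ++ [v])
        = scanB (lst.filter (fun m => !hitB [PySem.List.pyGetD v 0 0, PySem.List.pyGetD v 1 0] m))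
            [] (g ++ [v]) := by
      have h1 := scan_filter [PySem.List.pyGetD v 0 0, PySem.List.pyGetD v 1 0] lst [] (g ++ [v])
      have h2 := scan_drop [PySem.List.pyGetD v 0 0, PySem.List.pyGetD v 1 0]
        (lst.filter (fun m => !hitB [PySem.List.pyGetD v 0 0, PySem.List.pyGetD v 1 0] m)) [] (g ++ [v])
        (by intro m hm; simpa using (List.of_mem_filter hm))
      simpa using h1.trans h2
    rw [hrhs]
    rw [deletA]
    simp only [hfold]
    cases hn : lst.filter (fun m => !hitB [PySem.List.pyGetD v 0 0, PySem.List.pyGetD v 1 0] m) with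
    | nil => simp [scanB]
    | cons c rest =>
      have hc_mem : c ∈ lst.filter (fun m => !hitB [PySem.List.pyGetD v 0 0, PySem.List.pyGetD v 1 0] m) := by
        rw [hn]; simp
      have hc_lst : c ∈ lst := List.mem_of_mem_filter hc_mem
      have hc_len : 2 ≤ c.length := hlen c hc_lst
      have hbound : (lst.filter (fun m => !hitB [PySem.List.pyGetD v 0 0, PySem.List.pyGetD v 1 0] m)).length + 1 ≤ f := by
        have hle : (lst.filter (fun m => !hitB [PySem.List.pyGetD v 0 0, PySem.List.pyGetD v 1 0] m)).length ≤ lst.length :=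
          List.length_filter_le _ _
        rcases hf with h | ⟨hmem, h⟩
        · omega
        · have : (lst.filter (fun m => !hitB [PySem.List.pyGetD v 0 0, PySem.List.pyGetD v 1 0] m)).length < lst.length := by
            apply List.length_filter_lt_length_iff_exists.mpr
            exact ⟨v, hmem, by simp [self_hit v hv]⟩
          omega
      have hIH := ih c (lst.filter (fun m => !hitB [PySem.List.pyGetD v 0 0, PySem.List.pyGetD v 1 0] m)) (g ++ [v])
        (fun m hm => hlen m (List.mem_of_mem_filter hm)) hc_len
        (Or.inr ⟨hc_mem, hbound⟩)
      rw [hn] at hIH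
      have hchit : hitB [PySem.List.pyGetD c 0 0, PySem.List.pyGetD c 1 0] c = true :=
        self_hit c hc_len
      show deletA f c (c :: rest) (g ++ [v]) = scanB (c :: rest) [] (g ++ [v])
      rw [hIH]
      simp only [scanB, hchit, if_true]
      simp [hitB]

-- ===== VERDICT (by name: the statement is the Claim_ definition above) =====
theorem delet_spec : Claim_equal_delet := by
  intro v mas g _ hpre
  unfold Spec_delet delet delet_alt
  cases mas with
  | nil => rfl
  | cons m0 ms =>
    have hv : 2 ≤ v.length := by
      rcases hpre.1 with h | h
      · exact absurd h (by simp)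
      · exact h
    have := deletA_eq_scanB ((m0 :: ms).length + 2) v (m0 :: ms) g hpre.2 hv (Or.inl (by omega))
    simpa using this
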